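-- pv_equiv track=rewrite | github.com/AVELURI12/Sentiment-Analyzer | gbas.py | extract_gutenberg_text
-- ===== SOURCE A (Python) =====
-- def extract_gutenberg_text(lines):
--     start_phrase = "*** START OF THE PROJECT GUTENBERG EBOOK" # assign start phrase
--     end_phrase = "*** END OF THE PROJECT GUTENBERG EBOOK" # assign end phrase
--     start_index = None
--     end_index = None
--
--     # Find the start and end indexes
--     for i, line in enumerate(lines): # iterate over lines and keep track of index
--         if line.strip().startswith(start_phrase): # check if line has start phrase
--             start_index = i + 1  # Start after the line with the start phrase
--         elif line.strip().startswith(end_phrase): # check if line has end phrase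
--             end_index = i  # End before the line with the end phrase
--             break
--
--     # Extract and return the lines between start and end indexes
--     if start_index is not None and end_index is not None:
--         return lines[start_index:end_index]
--     else:
--         # Return an empty list if the start or end phrases are not found
--         return []
-- ===== SOURCE B (Python) =====
-- def extract_gutenberg_text(lines):
--     start_phrase = "*** START OF THE PROJECT GUTENBERG EBOOK"
--     end_phrase = "*** END OF THE PROJECT GUTENBERG EBOOK"
--     collecting = False
--     result = []
--     for line in lines:
--         stripped = line.strip()
--         if stripped.startswith(start_phrase):
--             collecting = True
--             result = []
--         elif stripped.startswith(end_phrase):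
--             return result
--         elif collecting:
--             result.append(line)
--     return []
-- ===== Notes on version B (the rewrite author's own statement) =====
-- stated objective: simpler
-- what changed: Replaces the find-indices-then-slice loop (enumerate, start_index/end_index, lines[start:end]) with a single-pass state machine that keeps a collecting flag and accumulates the between-marker lines directly, resetting on each start marker and returning the accumulator at the end marker.
import Mathlib
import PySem

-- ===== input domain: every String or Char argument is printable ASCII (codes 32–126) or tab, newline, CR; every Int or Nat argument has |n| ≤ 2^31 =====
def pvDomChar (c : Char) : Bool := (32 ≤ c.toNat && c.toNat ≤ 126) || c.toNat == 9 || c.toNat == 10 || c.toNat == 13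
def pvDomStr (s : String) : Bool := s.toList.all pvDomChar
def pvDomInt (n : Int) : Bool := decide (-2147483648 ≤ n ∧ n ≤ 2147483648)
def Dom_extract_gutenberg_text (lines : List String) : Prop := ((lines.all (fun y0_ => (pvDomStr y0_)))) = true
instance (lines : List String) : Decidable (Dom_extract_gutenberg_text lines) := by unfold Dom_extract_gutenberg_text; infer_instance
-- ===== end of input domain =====

-- B replaces A's find-indices-then-slice with a single-pass state machine that
-- accumulates the between-marker lines directly (objective: simpler, one pass, no slicing).

def pvStartPhrase : String := "*** START OF THE PROJECT GUTENBERG EBOOK"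
def pvEndPhrase : String := "*** END OF THE PROJECT GUTENBERG EBOOK"

-- ===== PORT A =====
-- the for-loop of A: walks enumerate(lines), tracking start_index / end_index; break = return
def pvFindA : List (Int × String) → Option Int → Option Int × Option Int
  | [], si => (si, none)
  | (i, line) :: rest, si =>
    if PySem.Str.startswith (PySem.Str.strip line) pvStartPhrase then
      pvFindA rest (some (i + 1))
    else if PySem.Str.startswith (PySem.Str.strip line) pvEndPhrase then
      (si, some i)
    else
      pvFindA rest si

-- the final 'if start_index is not None and end_index is not None: return lines[start:end] else []'
def pvFinishA (r : Option Int × Option Int) (lines : List String) : List String :=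
  match r with
  | (some s, some e) => PySem.List.slice lines (some s) (some e)
  | _ => []

def extract_gutenberg_text (lines : List String) : List String :=
  pvFinishA (pvFindA (PySem.List.enumerate lines 0) none) lines

-- ===== PORT B =====
-- the for-loop of B: boolean `collecting` plus an accumulator `result`; return at the end marker
def pvLoopB : List String → Bool → List String → List String
  | [], _, _ => []
  | line :: rest, collecting, result =>
    if PySem.Str.startswith (PySem.Str.strip line) pvStartPhrase then
      pvLoopB rest true []
    else if PySem.Str.startswith (PySem.Str.strip line) pvEndPhrase then
      result
    else if collecting then
      pvLoopB rest collecting (result ++ [line])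
    else
      pvLoopB rest collecting result

def extract_gutenberg_text_alt (lines : List String) : List String :=
  pvLoopB lines false []

-- ===== PRECONDITION & SPEC =====
def Spec_extract_gutenberg_text (lines : List String) (out : List String) : Prop := out = extract_gutenberg_text_alt lines
instance (lines : List String) (out : List String) : Decidable (Spec_extract_gutenberg_text lines out) := by unfold Spec_extract_gutenberg_text; infer_instance

-- ===== CLAIM (what is proved, stated in full; the proofs are below) =====
def Claim_equal_extract_gutenberg_text : Prop := ∀ (lines : List String), Dom_extract_gutenberg_text lines → Spec_extract_gutenberg_text lines (extract_gutenberg_text lines)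

-- ===== LEMMAS AND PROOFS =====

-- invariant when a start marker has been seen: A's pending start index is s,
-- B collects exactly full[s:k] where k is the current position
lemma pv_main_some (rest : List String) : ∀ (k s : Nat) (full : List String),
    rest = full.drop k → k ≤ full.length → s ≤ k →
    pvFinishA (pvFindA (PySem.List.enumerate rest (k : Int)) (some (s : Int))) full
    = pvLoopB rest true ((full.take k).drop s) := by
  induction rest with
  | nil =>
    intro k s full _ _ _
    simp [PySem.List.enumerate, pvFindA, pvFinishA, pvLoopB]
  | cons line rest ih =>
    intro k s full hrest hk hs
    have hklt : k < full.length := by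
      by_contra h
      have : full.drop k = [] := List.drop_eq_nil_of_le (by omega)
      rw [this] at hrest; exact absurd hrest (by simp)
    have hline : line = full[k] := by
      have := List.drop_eq_getElem_cons hklt
      rw [this] at hrest; exact (List.cons.injEq .. ▸ hrest).1
    have hrest' : rest = full.drop (k + 1) := by
      have := List.drop_eq_getElem_cons hklt
      rw [this] at hrest; exact (List.cons.injEq .. ▸ hrest).2
    rw [PySem.List.enumerate_cons]
    by_cases h1 : PySem.Str.startswith (PySem.Str.strip line) pvStartPhrase
    · simp only [pvFindA, pvLoopB, h1, if_pos]
      have hc : ((k : Int) + 1) = ((k + 1 : Nat) : Int) := by push_cast; ring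
      rw [hc]
      have := ih (k + 1) (k + 1) full hrest' (by omega) (le_refl _)
      rwa [List.drop_eq_nil_of_le (by simp)] at this
    · by_cases h2 : PySem.Str.startswith (PySem.Str.strip line) pvEndPhrase
      · simp only [pvFindA, h1, h2, pvLoopB, pvFinishA, Bool.false_eq_true, if_false, if_true]
        rw [PySem.List.slice_natCast, List.drop_take]
      · simp only [pvFindA, pvLoopB, h1, h2, Bool.false_eq_true, if_false, if_true]
        have hc : ((k : Int) + 1) = ((k + 1 : Nat) : Int) := by push_cast; ring
        rw [hc]
        have := ih (k + 1) s full hrest' (by omega) (by omega)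
        rwa [List.take_add_one, List.getElem?_eq_getElem hklt, Option.toList_some,
             List.drop_append_of_le_length (by simp; omega), ← hline] at this

-- invariant before any start marker: A's start index is None, B is not collecting
lemma pv_main_none (rest : List String) : ∀ (k : Nat) (full : List String),
    rest = full.drop k → k ≤ full.length →
    pvFinishA (pvFindA (PySem.List.enumerate rest (k : Int)) none) full
    = pvLoopB rest false [] := by
  induction rest with
  | nil =>
    intro k full _ _
    simp [PySem.List.enumerate, pvFindA, pvFinishA, pvLoopB]
  | cons line rest ih =>
    intro k full hrest hk
    have hklt : k < full.length := by
      by_contra h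
      have : full.drop k = [] := List.drop_eq_nil_of_le (by omega)
      rw [this] at hrest; exact absurd hrest (by simp)
    have hrest' : rest = full.drop (k + 1) := by
      have := List.drop_eq_getElem_cons hklt
      rw [this] at hrest; exact (List.cons.injEq .. ▸ hrest).2
    rw [PySem.List.enumerate_cons]
    by_cases h1 : PySem.Str.startswith (PySem.Str.strip line) pvStartPhrase
    · simp only [pvFindA, pvLoopB, h1, if_pos]
      have hc : ((k : Int) + 1) = ((k + 1 : Nat) : Int) := by push_cast; ring
      rw [hc]
      have := pv_main_some rest (k + 1) (k + 1) full hrest' (by omega) (le_refl _)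
      rwa [List.drop_eq_nil_of_le (by simp)] at this
    · by_cases h2 : PySem.Str.startswith (PySem.Str.strip line) pvEndPhrase
      · simp only [pvFindA, pvLoopB, pvFinishA, h1, h2, Bool.false_eq_true, if_false, if_true]
      · simp only [pvFindA, pvLoopB, h1, h2, Bool.false_eq_true, if_false]
        exact ih (k + 1) full hrest' (by omega)

-- ===== VERDICT (by name: the statement is the Claim_ definition above) =====
theorem extract_gutenberg_text_spec : Claim_equal_extract_gutenberg_text := by
  intro lines _
  unfold Spec_extract_gutenberg_text extract_gutenberg_text extract_gutenberg_text_alt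
  change pvFinishA (pvFindA (PySem.List.enumerate lines ((0 : Nat) : Int)) none) lines = _
  exact pv_main_none lines 0 lines (by simp) (by omega)
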